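-- pv_equiv track=rewrite | github.com/emiliarantonen/mooc-tira2 | kurssit/algoritmit2/week11/fliptwo.py | solve
-- ===== SOURCE A (Python) =====
-- from collections import deque
--
-- def solve(n, k):
--     queue = deque(range(1, n+1))
--     for i in range(k):
--         if len(queue) == 1:
--             return queue[0]
--         a = queue.popleft()
--         b = queue.popleft()
--         queue.append(b)
--         queue.append(a)
--
--     return queue[0]
-- ===== SOURCE B (Python) =====
-- def solve(n, k):
--     # closed form: front of deque after m pair-swap rotations (period n for even n, (n+1)/2 for odd n)
--     m = k if k > 0 else 0
--     if n == 1: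
--         return 1
--     if n % 2 == 1:
--         m %= (n + 1) // 2
--         return 2 * m + 1
--     m %= n
--     return 2 * m + 1 if 2 * m < n else 2 * m - n + 2
-- ===== Notes on version B (the rewrite author's own statement) =====
-- stated objective: faster
-- what changed: Replaced the O(k) deque simulation with an O(1) closed-form formula for the front position after k pair-swap rotations (the step is a fixed position permutation whose orbit of position 0 has period n for even n and (n+1)/2 for odd n).
import Mathlib
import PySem

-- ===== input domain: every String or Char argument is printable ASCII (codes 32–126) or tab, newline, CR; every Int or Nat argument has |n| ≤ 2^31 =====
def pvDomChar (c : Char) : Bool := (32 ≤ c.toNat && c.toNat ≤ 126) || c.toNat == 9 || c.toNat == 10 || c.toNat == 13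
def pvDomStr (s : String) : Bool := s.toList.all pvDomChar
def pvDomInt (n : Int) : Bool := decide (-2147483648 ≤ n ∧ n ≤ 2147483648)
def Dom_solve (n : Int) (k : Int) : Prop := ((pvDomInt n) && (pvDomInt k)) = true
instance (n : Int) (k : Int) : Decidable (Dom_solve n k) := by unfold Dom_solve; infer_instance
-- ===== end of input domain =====

-- B replaces A's O(k) deque simulation by an O(1) closed form for the front after k pair-swap rotations.

-- ===== PORT A =====
-- collections.deque ported as a two-list deque (front, reversed back) with its O(1) length,
-- so popleft/append are constant time as in Python; the deque holds front ++ back.reverse.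
def popleftD : List Int → List Int → Option (Int × List Int × List Int)
  | [], b => match b.reverse with
             | [] => none
             | x :: rest => some (x, rest, [])
  | x :: f, b => some (x, f, b)

def solveLoopA : Nat → Nat → List Int → List Int → Option Int
  | 0, _, f, b => PySem.List.pyGet? (f ++ b.reverse) 0
  | t+1, len, f, b =>
    if len = 1 then PySem.List.pyGet? (f ++ b.reverse) 0
    else match popleftD f b with
      | none => none
      | some (a, f1, b1) => match popleftD f1 b1 with
        | none => none
        | some (x, f2, b2) => solveLoopA t len f2 (a :: x :: b2)

def solve (n : Int) (k : Int) : Int :=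
  let q := PySem.List.pyRange 1 (n + 1) 1
  (solveLoopA k.toNat q.length q []).getD 0

-- ===== PORT B =====
def solve_alt (n : Int) (k : Int) : Int :=
  let m0 : Int := if k > 0 then k else 0
  if n = 1 then 1
  else if PySem.Int.mod n 2 = 1 then
    2 * PySem.Int.mod m0 (PySem.Int.floordiv (n + 1) 2) + 1
  else
    let m := PySem.Int.mod m0 n
    if 2 * m < n then 2 * m + 1 else 2 * m - n + 2

-- ===== PRECONDITION & SPEC =====
-- Pre_ excludes n ≤ 0, where A's queue is empty and A raises IndexError (queue[0] / popleft).
def Pre_solve (n : Int) (k : Int) : Prop := 1 ≤ n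
instance (n : Int) (k : Int) : Decidable (Pre_solve n k) := by unfold Pre_solve; infer_instance
def pvWitness_solve : Int × Int := (5, 3)

def Spec_solve (n : Int) (k : Int) (out : Int) : Prop := out = solve_alt n k
instance (n : Int) (k : Int) (out : Int) : Decidable (Spec_solve n k out) := by unfold Spec_solve; infer_instance

-- ===== CLAIM (what is proved, stated in full; the proofs are below) =====
def Claim_equal_solve : Prop := ∀ (n : Int) (k : Int), Dom_solve n k → Pre_solve n k → Spec_solve n k (solve n k)

-- ===== LEMMAS AND PROOFS =====

-- position permutation of one deque step: new[j] = old[tauPos j]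
def tauPos (n p : Nat) : Nat := if p = n - 2 then 1 else if p = n - 1 then 0 else p + 2

-- closed form for tauPos^t(0)
def cfFront (n t : Nat) : Nat :=
  if n % 2 = 1 then 2 * (t % ((n + 1) / 2))
  else if 2 * (t % n) < n then 2 * (t % n) else 2 * (t % n) - n + 1

lemma cf_zero (n : Nat) (hn : 2 ≤ n) : cfFront n 0 = 0 := by
  unfold cfFront
  have h1 : 0 % ((n + 1) / 2) = 0 := Nat.zero_mod _
  have h2 : 0 % n = 0 := Nat.zero_mod _
  split_ifs <;> omega

lemma cf_lt (n t : Nat) (hn : 2 ≤ n) : cfFront n t < n := by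
  unfold cfFront
  have h1 : t % ((n + 1) / 2) < (n + 1) / 2 := Nat.mod_lt _ (by omega)
  have h2 : t % n < n := Nat.mod_lt _ (by omega)
  split_ifs <;> omega

lemma succ_mod (L t : Nat) (hL : 2 ≤ L) :
    (t + 1) % L = if t % L + 1 = L then 0 else t % L + 1 := by
  have h1 : (t % L + 1) % L = (t + 1) % L := Nat.mod_add_mod t L 1
  have h2 : t % L < L := Nat.mod_lt _ (by omega)
  split_ifs with h
  · rw [← h1, h, Nat.mod_self]
  · rw [← h1, Nat.mod_eq_of_lt (by omega)]

lemma cf_succ (n t : Nat) (hn : 2 ≤ n) : cfFront n (t + 1) = tauPos n (cfFront n t) := by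
  unfold cfFront tauPos
  by_cases hp : n % 2 = 1
  · have hL : 2 ≤ (n + 1) / 2 := by omega
    have h2 : t % ((n + 1) / 2) < (n + 1) / 2 := Nat.mod_lt _ (by omega)
    rw [succ_mod _ _ hL]
    simp only [hp, if_true]
    split_ifs <;> omega
  · have h2 : t % n < n := Nat.mod_lt _ (by omega)
    rw [succ_mod _ _ hn]
    simp only [hp, if_false]
    split_ifs <;> omega

lemma step_getElem (a b : Int) (rest : List Int) (j : Nat) (hj : j < rest.length + 2) :
    (rest ++ [b, a])[j]? = (a :: b :: rest)[tauPos (rest.length + 2) j]? := by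
  unfold tauPos
  split_ifs with h1 h2
  · have : j = rest.length := by omega
    subst this
    simp
  · have : j = rest.length + 1 := by omega
    subst this
    rw [List.getElem?_append_right (by omega)]
    simp
  · have hj' : j < rest.length := by omega
    rw [List.getElem?_append_left hj']
    simp

-- reference single-list form of A's loop (proof helper)
def solveLoopL : Nat → List Int → Option Int
  | 0, q => PySem.List.pyGet? q 0
  | _+1, [] => none
  | _+1, [x] => some x
  | t+1, a :: b :: rest => solveLoopL t (rest ++ [b, a])

lemma popleftD_none (f b : List Int) (h : popleftD f b = none) : f ++ b.reverse = [] := by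
  match f with
  | [] =>
    simp only [popleftD] at h
    match hb : b.reverse with
    | [] => rfl
    | x :: rest => rw [hb] at h; simp at h
  | x :: f' => simp [popleftD] at h

lemma popleftD_some (f b : List Int) (x : Int) (f' b' : List Int)
    (h : popleftD f b = some (x, f', b')) : f ++ b.reverse = x :: (f' ++ b'.reverse) := by
  match f with
  | [] =>
    simp only [popleftD] at h
    match hb : b.reverse with
    | [] => rw [hb] at h; simp at h
    | y :: rest =>
      rw [hb] at h
      simp only [Option.some.injEq, Prod.mk.injEq] at h
      obtain ⟨h1, h2, h3⟩ := h
      subst h1 h2 h3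
      simp
  | z :: f'' =>
    simp only [popleftD, Option.some.injEq, Prod.mk.injEq] at h
    obtain ⟨h1, h2, h3⟩ := h
    subst h1 h2 h3
    simp

lemma loopA_bridge : ∀ (t len : Nat) (f b : List Int), len = f.length + b.length →
    solveLoopA t len f b = solveLoopL t (f ++ b.reverse) := by
  intro t
  induction t with
  | zero => intro len f b _; rfl
  | succ t ih =>
    intro len f b hlen
    have hq : (f ++ b.reverse).length = len := by simp [hlen]
    by_cases h1 : len = 1
    · obtain ⟨x, hxq⟩ := List.length_eq_one_iff.mp (by rw [hq, h1])
      rw [solveLoopA, if_pos h1, hxq, solveLoopL]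
      simp
    · match h2 : popleftD f b with
      | none =>
        have he := popleftD_none f b h2
        rw [solveLoopA, if_neg h1, h2, he, solveLoopL]
      | some (a, f1, b1) =>
        have ha := popleftD_some f b a f1 b1 h2
        match h3 : popleftD f1 b1 with
        | none =>
          exfalso
          have he := popleftD_none f1 b1 h3
          rw [ha, he] at hq
          simp at hq
          omega
        | some (x, f2, b2) =>
          have hx := popleftD_some f1 b1 x f2 b2 h3
          have hrep : f ++ b.reverse = a :: x :: (f2 ++ b2.reverse) := by rw [ha, hx]
          have hlen2 : len = f2.length + (a :: x :: b2).length := by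
            have h5 := congrArg List.length hrep
            simp only [List.length_append, List.length_reverse, List.length_cons] at h5
            simp only [List.length_cons]
            omega
          rw [solveLoopA, if_neg h1, h2]
          dsimp only
          rw [h3]
          dsimp only
          rw [hrep, solveLoopL, ih len f2 (a :: x :: b2) hlen2]
          simp

lemma solveLoopL_singleton (t : Nat) (x : Int) : solveLoopL t [x] = some x := by
  cases t <;> simp [solveLoopL]

lemma loopA_cf : ∀ (t : Nat) (q : List Int), 2 ≤ q.length →
    solveLoopL t q = q[cfFront q.length t]? := by
  intro t
  induction t with
  | zero =>
    intro q hq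
    rw [solveLoopL, cf_zero _ hq, PySem.List.pyGet?_zero]
  | succ t ih =>
    intro q hq
    match q with
    | a :: b :: rest =>
      have hlen : (a :: b :: rest).length = rest.length + 2 := by simp
      rw [solveLoopL]
      have hlen2 : (rest ++ [b, a]).length = rest.length + 2 := by simp
      rw [ih (rest ++ [b, a]) (by omega), hlen2, hlen]
      rw [step_getElem a b rest _ (cf_lt _ _ (by omega)), cf_succ _ _ (by omega)]

lemma solve_eq_loopL (n k : Int) :
    solve n k = (solveLoopL k.toNat (PySem.List.pyRange 1 (n + 1) 1)).getD 0 := by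
  unfold solve
  show (solveLoopA k.toNat (PySem.List.pyRange 1 (n + 1) 1).length
      (PySem.List.pyRange 1 (n + 1) 1) []).getD 0 = _
  rw [loopA_bridge _ _ _ [] (by simp)]
  simp

lemma solveA_closed (n k : Int) (hn : 2 ≤ n) :
    solve n k = ((1 + cfFront n.toNat k.toNat : Nat) : Int) := by
  rw [solve_eq_loopL]
  rw [PySem.List.pyRange_one]
  have hb : (n + 1 - 1).toNat = n.toNat := by omega
  rw [hb]
  rw [loopA_cf k.toNat _ (by simp; omega)]
  simp only [List.length_map, List.length_range]
  have hcf := cf_lt n.toNat k.toNat (by omega)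
  rw [List.getElem?_map, List.getElem?_range hcf]
  simp only [Option.map_some, Option.getD_some]
  push_cast
  ring

lemma solveAlt_closed (n k : Int) (hn : 2 ≤ n) :
    solve_alt n k = ((1 + cfFront n.toNat k.toNat : Nat) : Int) := by
  unfold solve_alt cfFront
  have hne : ¬ n = 1 := by omega
  rw [if_neg hne]
  have hm0 : (if k > 0 then k else 0) = ((k.toNat : Nat) : Int) := by split <;> omega
  have hn' : n = ((n.toNat : Nat) : Int) := by omega
  have hpar : PySem.Int.mod n 2 = n % 2 := PySem.Int.mod_eq_emod_of_pos (by omega)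
  by_cases hodd : n.toNat % 2 = 1
  · have h1 : PySem.Int.mod n 2 = 1 := by rw [hpar]; omega
    rw [if_pos h1, if_pos hodd]
    have hfd : PySem.Int.floordiv (n + 1) 2 = ((((n.toNat + 1) / 2 : Nat)) : Int) := by
      rw [PySem.Int.floordiv_eq_ediv_of_pos (by omega)]; omega
    rw [hm0, hfd, PySem.Int.mod_natCast]
    push_cast
    ring
  · have h1 : ¬ PySem.Int.mod n 2 = 1 := by rw [hpar]; omega
    rw [if_neg h1, if_neg hodd]
    rw [hm0]
    conv_lhs => rw [hn']
    rw [PySem.Int.mod_natCast]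
    have h2 : k.toNat % n.toNat < n.toNat := Nat.mod_lt _ (by omega)
    rcases Nat.lt_or_ge (2 * (k.toNat % n.toNat)) n.toNat with h | h
    · rw [if_pos (by omega : 2 * ((k.toNat % n.toNat : Nat) : Int) < ((n.toNat : Nat) : Int)),
        if_pos h]
      push_cast; ring
    · rw [if_neg (by omega : ¬ 2 * ((k.toNat % n.toNat : Nat) : Int) < ((n.toNat : Nat) : Int)),
        if_neg (by omega)]
      push_cast [h]
      omega

lemma solve_one (k : Int) : solve 1 k = 1 := by
  rw [solve_eq_loopL]
  have h : PySem.List.pyRange 1 (1 + 1) 1 = [1] := by decide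
  rw [h, solveLoopL_singleton]
  rfl

-- ===== VERDICT (by name: the statement is the Claim_ definition above) =====
theorem solve_spec : Claim_equal_solve := by
  intro n k _ hpre
  unfold Spec_solve
  rcases eq_or_lt_of_le (hpre : (1:Int) ≤ n) with h1 | h2
  · rw [← h1, solve_one]
    rfl
  · rw [solveA_closed n k (by omega), solveAlt_closed n k (by omega)]
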